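-- pv_equiv track=rewrite | github.com/jacobvsdanniel/cross-ner | conll2003.py | get_chunk_to_entitytype
-- ===== SOURCE A (Python) =====
-- def get_chunk_to_entitytype(conll_tokenlabel_sequence):
--     chunk_to_entitytype = {}
--
--     left, entity_type = None, None
--     for index, token_label in enumerate(conll_tokenlabel_sequence + ["O"]):
--         if (token_label[0]=="O" or token_label[0]=="B") and entity_type:
--             chunk_to_entitytype[(left, index)] = entity_type
--             left, entity_type = None, None
--
--         if token_label[0]=="B" or (token_label[0]=="I" and not entity_type):
--             left, entity_type = index, token_label[2:]
--
--     return chunk_to_entitytype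
-- ===== SOURCE B (Python) =====
-- def get_chunk_to_entitytype(conll_tokenlabel_sequence):
--     chunk_to_entitytype = {}
--     n = len(conll_tokenlabel_sequence)
--     i = 0
--     while i < n:
--         label = conll_tokenlabel_sequence[i]
--         if label[0] in ('B', 'I') and label[2:]:
--             j = i + 1
--             while j < n and conll_tokenlabel_sequence[j][0] not in ('B', 'O'):
--                 j += 1
--             chunk_to_entitytype[(i, j)] = label[2:]
--             i = j
--         else:
--             i += 1
--     return chunk_to_entitytype
-- ===== Notes on version B (the rewrite author's own statement) =====
-- stated objective: alternative
-- what changed: A's single fold over the sequence plus an appended 'O' sentinel with persistent (left, entity_type) state is replaced by a find-then-consume index scan: an outer loop locates each chunk start (a B/I tag with a nonempty type) and an inner loop advances to the first following B/O tag, recording the chunk directly without any sentinel or carried state.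
import Mathlib
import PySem

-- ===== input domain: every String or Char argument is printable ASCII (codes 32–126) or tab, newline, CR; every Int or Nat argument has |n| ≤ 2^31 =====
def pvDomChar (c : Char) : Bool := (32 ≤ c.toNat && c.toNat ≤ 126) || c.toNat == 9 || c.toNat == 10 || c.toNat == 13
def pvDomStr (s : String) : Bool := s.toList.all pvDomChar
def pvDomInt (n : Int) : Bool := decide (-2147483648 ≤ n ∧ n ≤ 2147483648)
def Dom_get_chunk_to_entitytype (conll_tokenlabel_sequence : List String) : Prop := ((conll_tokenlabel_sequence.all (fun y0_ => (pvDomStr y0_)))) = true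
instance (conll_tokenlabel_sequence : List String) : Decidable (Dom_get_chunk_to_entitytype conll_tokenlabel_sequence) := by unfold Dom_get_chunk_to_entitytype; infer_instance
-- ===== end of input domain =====

-- B replaces A's sentinel-driven persistent-state fold by a find-then-consume index scan (alternative decomposition, same cost).


-- ===== PORT A =====
-- token_label[0]: exact for nonempty token_label (Pre_ excludes ""; Python raises IndexError there)
def pvChr0 (s : String) : Char := (PySem.Str.pyGet? s 0).getD '?'
-- token_label[2:]
def pvTl2 (s : String) : String := PySem.Str.slice s (some 2) none
-- Python truthiness of entity_type (None or "" are falsy); state = (left, entity_type) set/cleared together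
def pvTruthy : Option (Int × String) → Bool
  | some (_, e) => e != ""
  | none => false

-- one iteration of A's for-loop body (state: the dict and the (left, entity_type) pair)
def aStep (p : PySem.Dict (Int × Int) String × Option (Int × String)) (it : Int × String) :
    PySem.Dict (Int × Int) String × Option (Int × String) :=
  let c := pvChr0 it.2
  let p1 :=
    if (c = 'O' ∨ c = 'B') ∧ pvTruthy p.2 then
      match p.2 with
      | some (l, e) => (p.1.insert (l, it.1) e, (none : Option (Int × String)))
      | none => p
    else p
  if c = 'B' ∨ (c = 'I' ∧ ¬ pvTruthy p1.2) then (p1.1, some (it.1, pvTl2 it.2)) else p1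

def get_chunk_to_entitytype (conll_tokenlabel_sequence : List String) : List (Int × Int × String) :=
  let r := (PySem.List.enumerate (conll_tokenlabel_sequence ++ ["O"]) 0).foldl aStep
      ((PySem.Dict.empty : PySem.Dict (Int × Int) String), (none : Option (Int × String)))
  r.1.items.map (fun q => (q.1.1, q.1.2, q.2))

-- ===== PORT B =====
-- inner while loop: advance j past tags whose first char is not 'B'/'O'; returns (j, remaining suffix)
def bConsume : List String → Int → Int × List String
  | [], j => (j, [])
  | l :: rest, j =>
    let c := pvChr0 l
    if c = 'B' ∨ c = 'O' then (j, l :: rest) else bConsume rest (j + 1)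

theorem bConsume_length_le (rest : List String) (j : Int) : (bConsume rest j).2.length ≤ rest.length := by
  induction rest generalizing j with
  | nil => simp [bConsume]
  | cons l rest ih =>
    simp only [bConsume]
    split
    · simp
    · exact le_trans (ih (j + 1)) (by simp)

-- outer while loop over the index i
def bScan : List String → Int → List (Int × Int × String) → List (Int × Int × String)
  | [], _, acc => acc
  | l :: rest, i, acc =>
    let c := pvChr0 l
    let e := pvTl2 l
    if (c = 'B' ∨ c = 'I') ∧ e ≠ "" then
      let jr := bConsume rest (i + 1)
      bScan jr.2 jr.1 (acc ++ [(i, jr.1, e)])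
    else bScan rest (i + 1) acc
termination_by xs => xs.length
decreasing_by
  · exact Nat.lt_succ_of_le (bConsume_length_le rest (i + 1))
  · simp

def get_chunk_to_entitytype_alt (conll_tokenlabel_sequence : List String) : List (Int × Int × String) :=
  bScan conll_tokenlabel_sequence 0 []

-- ===== PRECONDITION & SPEC =====
-- Pre_ excludes sequences containing the empty string "", on which Python A raises IndexError (token_label[0]); B raises there too.
def Pre_get_chunk_to_entitytype (conll_tokenlabel_sequence : List String) : Prop :=
  ∀ s ∈ conll_tokenlabel_sequence, s ≠ ""
instance (conll_tokenlabel_sequence : List String) : Decidable (Pre_get_chunk_to_entitytype conll_tokenlabel_sequence) := by unfold Pre_get_chunk_to_entitytype; infer_instance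

def pvWitness_get_chunk_to_entitytype : List String := ["B-PER", "I-PER", "O", "B-LOC"]

def Spec_get_chunk_to_entitytype (conll_tokenlabel_sequence : List String) (out : List (Int × Int × String)) : Prop := out = get_chunk_to_entitytype_alt conll_tokenlabel_sequence
instance (conll_tokenlabel_sequence : List String) (out : List (Int × Int × String)) : Decidable (Spec_get_chunk_to_entitytype conll_tokenlabel_sequence out) := by unfold Spec_get_chunk_to_entitytype; infer_instance

-- ===== CLAIM (what is proved, stated in full; the proofs are below) =====
def Claim_equal_get_chunk_to_entitytype : Prop := ∀ (conll_tokenlabel_sequence : List String), Dom_get_chunk_to_entitytype conll_tokenlabel_sequence → Pre_get_chunk_to_entitytype conll_tokenlabel_sequence → Spec_get_chunk_to_entitytype conll_tokenlabel_sequence (get_chunk_to_entitytype conll_tokenlabel_sequence)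

-- ===== LEMMAS AND PROOFS =====

theorem pvTruthy_none : pvTruthy none = false := rfl
theorem pvTruthy_some (l : Int) (e : String) : pvTruthy (some (l, e)) = (e != "") := rfl

-- flatten a dict item into the output triple
def pvTri (q : (Int × Int) × String) : Int × Int × String := (q.1.1, q.1.2, q.2)

-- list-accumulator version of A's fold (dict replaced by an append list; same state machine)
def aRunL : List (Int × String) → Option (Int × String) → List (Int × Int × String) →
    List (Int × Int × String) × Option (Int × String)
  | [], st, acc => (acc, st)
  | (idx, tl) :: ls, st, acc =>
    let c := pvChr0 tl
    let q :=
      if (c = 'O' ∨ c = 'B') ∧ pvTruthy st then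
        (acc ++ (match st with | some (l, e) => [(l, idx, e)] | none => []), (none : Option (Int × String)))
      else (acc, st)
    if c = 'B' ∨ (c = 'I' ∧ ¬ pvTruthy q.2) then aRunL ls (some (idx, pvTl2 tl)) q.1
    else aRunL ls q.2 q.1

-- final flush performed by the appended "O" sentinel at index n
def aFinish (p : List (Int × Int × String) × Option (Int × String)) (n : Int) : List (Int × Int × String) :=
  match p.2 with
  | some (l, e) => if e ≠ "" then p.1 ++ [(l, n, e)] else p.1
  | none => p.1

-- dict bridge: since close indices strictly increase, every dict insert is a fresh-key append
theorem bridge (xs : List String) : ∀ (j : Int) (d : PySem.Dict (Int × Int) String) (st : Option (Int × String)),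
    d.keys.Nodup → (∀ p ∈ d.keys, p.2 < j) →
    (((PySem.List.enumerate xs j).foldl aStep (d, st)).1.items.map pvTri,
      ((PySem.List.enumerate xs j).foldl aStep (d, st)).2)
      = aRunL (PySem.List.enumerate xs j) st (d.items.map pvTri) := by
  induction xs with
  | nil => intro j d st _ _; simp [PySem.List.enumerate_nil, aRunL]
  | cons x xs ih =>
    intro j d st hnd hlt
    rw [PySem.List.enumerate_cons]
    simp only [List.foldl_cons, aRunL, aStep]
    by_cases hc : (pvChr0 x = 'O' ∨ pvChr0 x = 'B') ∧ pvTruthy st = true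
    · obtain ⟨⟨l, e⟩, hst⟩ : ∃ p : Int × String, st = some p := by
        match st with
        | some p => exact ⟨p, rfl⟩
        | none => rw [pvTruthy_none] at hc; simp at hc
      subst hst
      rw [if_pos hc, if_pos hc]
      have hcont : d.contains (l, j) = false := by
        rw [Bool.eq_false_iff]
        intro h
        exact absurd (hlt _ ((PySem.Dict.contains_iff_mem_keys d (l, j)).mp h)) (lt_irrefl j)
      have hitems : (d.insert (l, j) e).items = d.items ++ [((l, j), e)] :=
        PySem.Dict.items_insert_of_not_contains d e hcont
      have hkeys : (d.insert (l, j) e).keys = d.keys ++ [(l, j)] :=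
        PySem.Dict.keys_insert_of_not_contains d e hcont
      have hnd' : (d.insert (l, j) e).keys.Nodup := by
        rw [hkeys]
        refine List.Nodup.append hnd (List.nodup_singleton _) ?_
        intro p hp hq
        rw [List.mem_singleton] at hq
        subst hq
        exact absurd (hlt _ hp) (lt_irrefl j)
      have hlt' : ∀ p ∈ (d.insert (l, j) e).keys, p.2 < j + 1 := by
        intro p hp
        rw [hkeys, List.mem_append, List.mem_singleton] at hp
        rcases hp with hp | hp
        · exact lt_trans (hlt p hp) (by omega)
        · subst hp; omega
      have hmap : (d.insert (l, j) e).items.map pvTri = d.items.map pvTri ++ [(l, j, e)] := by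
        rw [hitems, List.map_append]; rfl
      by_cases hb : pvChr0 x = 'B' ∨ (pvChr0 x = 'I' ∧ ¬ pvTruthy (none : Option (Int × String)) = true)
      · rw [if_pos hb, if_pos hb]
        rw [ih (j + 1) (d.insert (l, j) e) (some (j, pvTl2 x)) hnd' hlt', hmap]
      · rw [if_neg hb, if_neg hb]
        rw [ih (j + 1) (d.insert (l, j) e) none hnd' hlt', hmap]
    · rw [if_neg hc, if_neg hc]
      by_cases hb : pvChr0 x = 'B' ∨ (pvChr0 x = 'I' ∧ ¬ pvTruthy st = true)
      · rw [if_pos hb, if_pos hb]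
        exact ih (j + 1) d (some (j, pvTl2 x)) hnd (fun p hp => lt_trans (hlt p hp) (by omega))
      · rw [if_neg hb, if_neg hb]
        exact ih (j + 1) d st hnd (fun p hp => lt_trans (hlt p hp) (by omega))

theorem untruthy (ls : List (Int × String)) : ∀ st acc n, pvTruthy st = false →
    aFinish (aRunL ls st acc) n = aFinish (aRunL ls none acc) n := by
  induction ls with
  | nil =>
    intro st acc n h
    match st with
    | none => rfl
    | some (l, e) =>
      rw [pvTruthy_some, bne_eq_false_iff_eq] at h
      simp [aRunL, aFinish, h]
  | cons p ls ih =>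
    intro st acc n h
    obtain ⟨idx, tl⟩ := p
    simp only [aRunL, h, pvTruthy_none, Bool.false_eq_true, and_false, if_false,
      not_false_eq_true, and_true]
    by_cases hb : pvChr0 tl = 'B' ∨ pvChr0 tl = 'I'
    · rw [if_pos hb, if_pos hb]
    · rw [if_neg hb, if_neg hb]
      exact ih st acc n h

theorem bConsume_sum (rest : List String) : ∀ j : Int,
    (bConsume rest j).1 + (bConsume rest j).2.length = j + rest.length := by
  induction rest with
  | nil => simp [bConsume]
  | cons l rest ih =>
    intro j
    simp only [bConsume]
    split
    · simp
    · rw [ih (j + 1)]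
      simp only [List.length_cons]
      push_cast
      ring

theorem absorb (rest : List String) : ∀ (j i : Int) (e : String) acc n, e ≠ "" → n = j + rest.length →
    aFinish (aRunL (PySem.List.enumerate rest j) (some (i, e)) acc) n
      = aFinish (aRunL (PySem.List.enumerate (bConsume rest j).2 (bConsume rest j).1) none
          (acc ++ [(i, (bConsume rest j).1, e)])) n := by
  induction rest with
  | nil =>
    intro j i e acc n he hn
    simp only [List.length_nil, Nat.cast_zero, add_zero] at hn
    subst hn
    simp only [bConsume, PySem.List.enumerate_nil, aRunL, aFinish]
    simp [he]
  | cons l rest ih =>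
    intro j i e acc n he hn
    have htr : pvTruthy (some (i, e)) = true := by rw [pvTruthy_some, bne_iff_ne]; exact he
    by_cases hc : pvChr0 l = 'B' ∨ pvChr0 l = 'O'
    · have hbc : bConsume (l :: rest) j = (j, l :: rest) := by
        simp only [bConsume]; rw [if_pos hc]
      rw [hbc]
      rw [PySem.List.enumerate_cons]
      simp only [aRunL, htr, and_true, pvTruthy_none, Bool.false_eq_true, and_false, if_false,
        not_false_eq_true]
      rw [if_pos hc.symm]
      dsimp only
      simp only [pvTruthy_none, Bool.false_eq_true, not_false_eq_true, and_true]
    · have hbc : bConsume (l :: rest) j = bConsume rest (j + 1) := by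
        simp only [bConsume]; rw [if_neg hc]
      rw [hbc]
      rw [PySem.List.enumerate_cons]
      have h1 : ¬ ((pvChr0 l = 'O' ∨ pvChr0 l = 'B') ∧ pvTruthy (some (i, e)) = true) := by
        intro h
        exact hc h.1.symm
      have h2 : ¬ (pvChr0 l = 'B' ∨ (pvChr0 l = 'I' ∧ ¬ pvTruthy (acc, some (i, e)).2 = true)) := by
        intro h
        rcases h with h | ⟨_, h⟩
        · exact hc (Or.inl h)
        · exact h htr
      simp only [aRunL]
      rw [if_neg h1, if_neg h2]
      exact ih (j + 1) i e acc n he (by rw [hn]; simp; ring)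

theorem sentinel_step : ∀ (st : Option (Int × String)) acc (n : Int),
    (aRunL [(n, "O")] st acc).1 = aFinish (acc, st) n := by
  intro st acc n
  have hO : pvChr0 "O" = 'O' := by decide
  match st with
  | none => simp [aRunL, aFinish, hO, pvTruthy_none]
  | some (l, e) =>
    by_cases he : e = ""
    · subst he
      simp [aRunL, aFinish, hO, pvTruthy_some]
    · have htr : pvTruthy (some (l, e)) = true := by rw [pvTruthy_some, bne_iff_ne]; exact he
      simp [aRunL, aFinish, hO, htr, he]

theorem main_aux : ∀ (N : Nat) (xs : List String), xs.length ≤ N → ∀ (i : Int) (acc : List (Int × Int × String)),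
    bScan xs i acc = aFinish (aRunL (PySem.List.enumerate xs i) none acc) (i + xs.length) := by
  intro N
  induction N with
  | zero =>
    intro xs hx i acc
    rw [List.eq_nil_of_length_eq_zero (Nat.le_zero.mp hx)]
    simp [bScan, PySem.List.enumerate_nil, aRunL, aFinish]
  | succ N ihN =>
    intro xs hx i acc
    match xs with
    | [] => simp [bScan, PySem.List.enumerate_nil, aRunL, aFinish]
    | l :: rest =>
      rw [PySem.List.enumerate_cons]
      have hn : i + ((l :: rest).length : Int) = (i + 1) + (rest.length : Int) := by
        simp only [List.length_cons]; push_cast; ring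
      by_cases hb : (pvChr0 l = 'B' ∨ pvChr0 l = 'I') ∧ pvTl2 l ≠ ""
      · have hbs : bScan (l :: rest) i acc
            = bScan (bConsume rest (i + 1)).2 (bConsume rest (i + 1)).1
                (acc ++ [(i, (bConsume rest (i + 1)).1, pvTl2 l)]) := by
          rw [bScan]; rw [if_pos hb]
        rw [hbs]
        simp only [aRunL, pvTruthy_none, Bool.false_eq_true, and_false, if_false,
          not_false_eq_true, and_true]
        rw [if_pos hb.1, hn]
        rw [absorb rest (i + 1) i (pvTl2 l) acc ((i + 1) + (rest.length : Int)) hb.2 rfl]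
        have hsum := bConsume_sum rest (i + 1)
        rw [ihN (bConsume rest (i + 1)).2 (le_trans (bConsume_length_le rest (i + 1)) (Nat.le_of_succ_le_succ hx)) (bConsume rest (i + 1)).1 (acc ++ [(i, (bConsume rest (i + 1)).1, pvTl2 l)])]
        rw [hsum]
      · have hbs : bScan (l :: rest) i acc = bScan rest (i + 1) acc := by
          rw [bScan]; rw [if_neg hb]
        rw [hbs, hn]
        by_cases hbi : pvChr0 l = 'B' ∨ pvChr0 l = 'I'
        · have he : pvTl2 l = "" := by
            by_contra h
            exact hb ⟨hbi, h⟩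
          simp only [aRunL, pvTruthy_none, Bool.false_eq_true, and_false, if_false,
            not_false_eq_true, and_true]
          rw [if_pos hbi]
          rw [untruthy (PySem.List.enumerate rest (i + 1)) (some (i, pvTl2 l)) acc
            ((i + 1) + (rest.length : Int)) (by rw [pvTruthy_some, he]; rfl)]
          exact ihN rest (Nat.le_of_succ_le_succ hx) (i + 1) acc
        · simp only [aRunL, pvTruthy_none, Bool.false_eq_true, and_false, if_false,
            not_false_eq_true, and_true]
          rw [if_neg hbi]
          exact ihN rest (Nat.le_of_succ_le_succ hx) (i + 1) acc

theorem enumerate_append_singleton (xs : List String) (y : String) : ∀ j : Int,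
    PySem.List.enumerate (xs ++ [y]) j = PySem.List.enumerate xs j ++ [(j + xs.length, y)] := by
  induction xs with
  | nil => simp [PySem.List.enumerate_cons, PySem.List.enumerate_nil]
  | cons x xs ih =>
    intro j
    simp only [List.cons_append, PySem.List.enumerate_cons, ih (j + 1), List.length_cons]
    have h : j + 1 + (xs.length : Int) = j + ((xs.length + 1 : Nat) : Int) := by push_cast; ring
    rw [h]

theorem aRunL_append (ls ls' : List (Int × String)) : ∀ st acc,
    aRunL (ls ++ ls') st acc = aRunL ls' (aRunL ls st acc).2 (aRunL ls st acc).1 := by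
  induction ls with
  | nil => intro st acc; rfl
  | cons p ls ih =>
    intro st acc
    obtain ⟨idx, tl⟩ := p
    simp only [List.cons_append, aRunL]
    split <;> split <;> (try split) <;> exact ih _ _

-- ===== VERDICT (by name: the statement is the Claim_ definition above) =====
theorem get_chunk_to_entitytype_spec : Claim_equal_get_chunk_to_entitytype := by
  intro seq _ _
  unfold Spec_get_chunk_to_entitytype get_chunk_to_entitytype get_chunk_to_entitytype_alt
  have hb := bridge (seq ++ ["O"]) 0 (PySem.Dict.empty : PySem.Dict (Int × Int) String) none
    (by simp [PySem.Dict.keys_empty]) (by simp [PySem.Dict.keys_empty])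
  have h1 := congrArg Prod.fst hb
  simp only at h1
  show (((PySem.List.enumerate (seq ++ ["O"]) 0).foldl aStep
      ((PySem.Dict.empty : PySem.Dict (Int × Int) String), (none : Option (Int × String)))).1.items.map pvTri)
      = bScan seq 0 []
  rw [h1]
  have hemp : (PySem.Dict.empty : PySem.Dict (Int × Int) String).items.map pvTri = [] := rfl
  rw [hemp]
  rw [enumerate_append_singleton seq "O" 0]
  rw [aRunL_append]
  rw [sentinel_step]
  have hfin : aFinish ((aRunL (PySem.List.enumerate seq 0) none []).1,
      (aRunL (PySem.List.enumerate seq 0) none []).2) (0 + (seq.length : Int))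
      = aFinish (aRunL (PySem.List.enumerate seq 0) none []) (0 + (seq.length : Int)) := rfl
  rw [hfin]
  exact (main_aux seq.length seq le_rfl 0 []).symm
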